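-- pv_equiv track=rewrite | github.com/SaeedSarabchi/coding_interview_prep | Chapter 5/4.py | next_largest
-- ===== SOURCE A (Python) =====
-- def next_largest(num):
--     #count number of 1s
--     cnt_one = 0
--     cnt_bin = 0
--     while num>0:
--         if num & 1 == 1:
--             cnt_one += 1
--         num = num >> 1
--         cnt_bin += 1
--
--     res = 0
--     for i in range(cnt_one):
--         res = res << 1 | 1
--     for i in range(cnt_bin-cnt_one):
--         res = res << 1
--     return res
-- ===== SOURCE B (Python) =====
-- def next_largest(num):
--     # Largest value using the same multiset of binary digits:
--     # sort the digits of bin(num) in descending order and read them back.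
--     if num <= 0:
--         return 0
--     return int("".join(sorted(bin(num)[2:], reverse=True)), 2)
-- ===== Notes on version B (the rewrite author's own statement) =====
-- stated objective: alternative
-- what changed: Instead of counting bits with a loop and rebuilding the result with two shift loops, B sorts the binary-digit string of num in descending order and parses it back as a base-2 integer (the digit-sort view of 'same bits, largest value').
import Mathlib
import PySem

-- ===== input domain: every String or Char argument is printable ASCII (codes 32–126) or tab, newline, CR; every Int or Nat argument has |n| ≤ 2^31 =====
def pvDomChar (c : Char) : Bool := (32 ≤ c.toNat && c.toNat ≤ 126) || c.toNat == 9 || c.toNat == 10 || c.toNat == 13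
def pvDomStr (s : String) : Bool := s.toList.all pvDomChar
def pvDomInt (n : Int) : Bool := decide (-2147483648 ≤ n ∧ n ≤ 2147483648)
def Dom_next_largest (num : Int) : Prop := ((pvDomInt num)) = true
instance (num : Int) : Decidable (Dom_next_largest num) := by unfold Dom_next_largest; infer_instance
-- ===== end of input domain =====

-- B sorts the binary digits of num descending and parses them back (alternative algorithm; same cost class).


-- ===== PORT A =====
-- the while loop: counts set bits (cnt_one) and total bits (cnt_bin) of num
def nlCount (num cnt_one cnt_bin : Int) : Int × Int :=
  if h : num > 0 then
    nlCount (PySem.Int.floordiv num 2)                    -- num >> 1  (floor shift, exact)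
      (if PySem.Int.band num 1 == 1 then cnt_one + 1 else cnt_one)
      (cnt_bin + 1)
  else (cnt_one, cnt_bin)
termination_by num.toNat
decreasing_by
  rw [PySem.Int.floordiv_eq_ediv_of_pos (by norm_num)]
  omega

def next_largest (num : Int) : Int :=
  let c := nlCount num 0 0
  -- res = res << 1 | 1 : res << 1 is exactly res * 2 in Python for every int
  let res : Int := (PySem.List.pyRange 0 c.1 1).foldl (fun res _ => PySem.Int.bor (res * 2) 1) 0
  -- res = res << 1 : exactly res * 2
  (PySem.List.pyRange 0 (c.2 - c.1) 1).foldl (fun res _ => res * 2) res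

-- ===== PORT B =====
-- bin(n)[2:] for n > 0: the binary digit characters, most significant first (exact; [] for n = 0)
def binChars (n : Nat) : List Char :=
  if _h : n = 0 then []
  else binChars (n / 2) ++ [if n % 2 = 1 then '1' else '0']
termination_by n
decreasing_by omega

-- int(s, 2) on a string of '0'/'1' digits (exact there): Horner accumulation
def parseBin2 (l : List Char) : Int :=
  l.foldl (fun a c => a * 2 + (if c = '1' then 1 else 0)) 0

def next_largest_alt (num : Int) : Int :=
  if num ≤ 0 then 0
  else parseBin2 (PySem.List.sorted (binChars num.toNat) (fun c => c) true)

-- ===== PRECONDITION & SPEC =====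
def Spec_next_largest (num : Int) (out : Int) : Prop := out = next_largest_alt num
instance (num : Int) (out : Int) : Decidable (Spec_next_largest num out) := by unfold Spec_next_largest; infer_instance

-- ===== CLAIM (what is proved, stated in full; the proofs are below) =====
def Claim_equal_next_largest : Prop := ∀ (num : Int), Dom_next_largest num → Spec_next_largest num (next_largest num)

-- ===== LEMMAS AND PROOFS =====

-- A-side: the counting loop computes (bitCount, bitLength)
theorem nlCount_eq (num a b : Int) :
    nlCount num a b =
      if 0 < num then (a + (PySem.Int.bitCount num : Int), b + (PySem.Int.bitLength num : Int))
      else (a, b) := by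
  fun_induction nlCount num a b with
  | case1 num a b h ih =>
    rw [if_pos h]
    simp only [dite_eq_ite] at ih
    rw [ih]
    have hm2 : PySem.Int.band num 1 = PySem.Int.mod num 2 := PySem.Int.band_one num
    have hmod : PySem.Int.mod num 2 = num % 2 := PySem.Int.mod_eq_emod_of_pos (by norm_num)
    have hbc := PySem.Int.bitCount_of_pos (n := num) h
    have hbl := PySem.Int.bitLength_of_pos (n := num) h
    have hfd : PySem.Int.floordiv num 2 = num / 2 := PySem.Int.floordiv_eq_ediv_of_pos (by norm_num)
    by_cases hp : 0 < PySem.Int.floordiv num 2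
    · rw [if_pos hp]
      rw [hbc, hbl]
      have : (PySem.Int.mod num 2).toNat = if PySem.Int.band num 1 == 1 then 1 else 0 := by
        rw [hm2, hmod]
        split <;> rename_i hb <;> simp at hb <;> omega
      rw [this]
      split <;> simp only [Prod.mk.injEq] <;>
        exact ⟨by push_cast; ring, by push_cast; ring⟩
    · rw [if_neg hp]
      have h0 : PySem.Int.floordiv num 2 = 0 := by rw [hfd] at hp ⊢; omega
      rw [hbc, hbl, h0]
      simp only [PySem.Int.bitCount_zero, PySem.Int.bitLength_zero, Nat.add_zero, Nat.zero_add]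
      have : (PySem.Int.mod num 2).toNat = if PySem.Int.band num 1 == 1 then 1 else 0 := by
        rw [hm2, hmod]
        split <;> rename_i hb <;> simp at hb <;> omega
      rw [this]
      split <;> simp
  | case2 num a b h =>
    rw [if_neg (by omega)]

theorem two_mul_or_one (m : Nat) : 2*m ||| 1 = 2*m + 1 := by
  apply Nat.eq_of_testBit_eq
  intro i
  cases i with
  | zero => simp [Nat.testBit_zero]
  | succ i =>
    rw [Nat.testBit_lor]
    simp only [Nat.testBit_succ]
    have h1 : 2*m/2 = m := by omega
    have h2 : (2*m+1)/2 = m := by omega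
    have h3 : (1:Nat)/2 = 0 := by omega
    rw [h1, h2, h3]
    simp

theorem bor_two_mul_one (a : Int) (ha : 0 ≤ a) : PySem.Int.bor (a * 2) 1 = a * 2 + 1 := by
  rw [PySem.Int.bor_of_nonneg (by omega) (by norm_num)]
  have h : (a * 2).toNat = 2 * a.toNat := by omega
  have h1 : (1 : Int).toNat = 1 := rfl
  rw [h, h1, two_mul_or_one]
  omega

theorem fold_ones (l : List Int) : ∀ (a : Int), 0 ≤ a →
    l.foldl (fun r _ => PySem.Int.bor (r * 2) 1) a = a * 2 ^ l.length + (2 ^ l.length - 1) := by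
  induction l with
  | nil => intro a _; simp
  | cons x l ih =>
    intro a ha
    simp only [List.foldl_cons, List.length_cons]
    rw [bor_two_mul_one a ha, ih (a * 2 + 1) (by omega)]
    have : (2:Int) ^ (l.length + 1) = 2 * 2 ^ l.length := by ring
    rw [this]; ring

theorem fold_shift (l : List Int) : ∀ (a : Int),
    l.foldl (fun r _ => r * 2) a = a * 2 ^ l.length := by
  induction l with
  | nil => intro a; simp
  | cons x l ih =>
    intro a
    simp only [List.foldl_cons, List.length_cons]
    rw [ih]
    have : (2:Int) ^ (l.length + 1) = 2 * 2 ^ l.length := by ring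
    rw [this]; ring

-- B-side: binChars produces only '0'/'1' digits, bitCount ones and bitLength digits
theorem binChars_mem (n : Nat) : ∀ c ∈ binChars n, c = '1' ∨ c = '0' := by
  fun_induction binChars n with
  | case1 => simp
  | case2 n h ih =>
    intro c hc
    rw [List.mem_append] at hc
    rcases hc with hc | hc
    · exact ih c hc
    · simp at hc; subst hc; split <;> simp

theorem binChars_count (n : Nat) :
    (binChars n).count '1' = PySem.Int.bitCount (n : Int) := by
  fun_induction binChars n with
  | case1 => simp
  | case2 n h ih =>
    rw [PySem.Int.bitCount_natCast (show 0 < n by omega)]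
    rw [List.count_append, ih]
    have : (List.count '1' [if n % 2 = 1 then '1' else '0']) = n % 2 := by
      have := Nat.mod_two_eq_zero_or_one n
      rcases this with h2 | h2 <;> simp [h2]
    omega

theorem binChars_length (n : Nat) (hn : 0 < n) :
    (binChars n).length = PySem.Int.bitLength (n : Int) := by
  fun_induction binChars n with
  | case1 => omega
  | case2 n h ih =>
    rw [PySem.Int.bitLength_natCast (show 0 < n by omega)]
    rw [List.length_append]
    by_cases hp : 0 < n / 2
    · rw [ih hp]; simp
    · have h2 : n / 2 = 0 := by omega
      rw [h2]
      simp [binChars, PySem.Int.bitLength_zero]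

theorem count01 (l : List Char) (hm : ∀ c ∈ l, c = '1' ∨ c = '0') :
    l.count '1' + l.count '0' = l.length := by
  induction l with
  | nil => simp
  | cons x t ih =>
    have hx := hm x (by simp)
    have ht := ih (fun c hc => hm c (by simp [hc]))
    rcases hx with hx | hx <;> subst hx <;>
      simp at * <;> omega

-- a descending list of '0'/'1' digits is ones then zeros
theorem desc_binary (l : List Char) (hm : ∀ c ∈ l, c = '1' ∨ c = '0')
    (hp : l.Pairwise (fun a b => b ≤ a)) :
    l = List.replicate (l.count '1') '1' ++ List.replicate (l.count '0') '0' := by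
  induction l with
  | nil => simp
  | cons x t ih =>
    rw [List.pairwise_cons] at hp
    obtain ⟨hall, hpt⟩ := hp
    have htm : ∀ c ∈ t, c = '1' ∨ c = '0' := fun c hc => hm c (by simp [hc])
    rcases hm x (by simp) with hx | hx
    · subst hx
      have := ih htm hpt
      simp only [List.count_cons]
      norm_num
      rw [List.replicate_succ]
      simpa using this
    · subst hx
      have hall0 : ∀ c ∈ t, c = '0' := by
        intro c hc
        rcases htm c hc with h1 | h0
        · exfalso
          have := hall c hc
          rw [h1] at this
          exact absurd this (by decide)
        · exact h0
      have ht : t = List.replicate t.length '0' := List.eq_replicate_length.mpr hall0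
      have hc1 : List.count '1' ('0' :: t) = 0 := by
        simp [List.count_eq_zero]
        intro h1
        have := hall0 '1' h1
        exact absurd this (by decide)
      have hc0 : List.count '0' ('0' :: t) = t.length + 1 := by
        rw [List.count_cons]
        have : t.count '0' = t.length := by
          conv_lhs => rw [ht]
          simp
        simp [this]
      rw [hc1, hc0]
      simp [List.replicate_succ]
      exact ht

theorem parse_go_ones (c : Nat) : ∀ (a : Int),
    (List.replicate c '1').foldl (fun a c => a * 2 + (if c = '1' then 1 else 0)) a
      = a * 2 ^ c + (2 ^ c - 1) := by
  induction c with
  | zero => intro a; simp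
  | succ c ih =>
    intro a
    rw [List.replicate_succ, List.foldl_cons]
    norm_num
    rw [ih]
    have : (2:Int) ^ (c + 1) = 2 * 2 ^ c := by ring
    rw [this]; ring

theorem parse_go_zeros (z : Nat) : ∀ (a : Int),
    (List.replicate z '0').foldl (fun a c => a * 2 + (if c = '1' then 1 else 0)) a
      = a * 2 ^ z := by
  induction z with
  | zero => intro a; simp
  | succ z ih =>
    intro a
    rw [List.replicate_succ, List.foldl_cons]
    have h0 : (if ('0' : Char) = '1' then (1:Int) else 0) = 0 := by decide
    rw [h0, ih]
    have : (2:Int) ^ (z + 1) = 2 * 2 ^ z := by ring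
    rw [this]; ring

theorem parseBin2_block (c z : Nat) :
    parseBin2 (List.replicate c '1' ++ List.replicate z '0') = (2 ^ c - 1) * 2 ^ z := by
  unfold parseBin2
  rw [List.foldl_append, parse_go_ones, parse_go_zeros]
  ring

-- ===== VERDICT (by name: the statement is the Claim_ definition above) =====
theorem next_largest_spec : Claim_equal_next_largest := by
  unfold Claim_equal_next_largest
  intro num _
  unfold Spec_next_largest next_largest next_largest_alt
  rw [nlCount_eq]
  by_cases h : 0 < num
  · rw [if_pos h, if_neg (by omega)]
    simp only
    set cnt := PySem.Int.bitCount num with hc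
    set w := PySem.Int.bitLength num with hw
    have hcw : cnt ≤ w := PySem.Int.bitCount_le_bitLength num
    rw [fold_ones _ 0 le_rfl, fold_shift]
    rw [PySem.List.length_pyRange_one, PySem.List.length_pyRange_one]
    have h1 : ((0 : Int) + (cnt : Int) - 0).toNat = cnt := by omega
    have h2 : ((0 : Int) + (w : Int) - (0 + (cnt : Int)) - 0).toNat = w - cnt := by omega
    rw [h1, h2]
    -- B side
    have hn : num = ((num.toNat : Nat) : Int) := by omega
    set l := binChars num.toNat with hl
    set s := PySem.List.sorted l (fun c => c) true with hs
    have hperm : s.Perm l := PySem.List.sorted_perm l _ true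
    have hsm : ∀ c ∈ s, c = '1' ∨ c = '0' := by
      intro c hc
      exact binChars_mem num.toNat c (hperm.mem_iff.mp hc)
    have hpw : s.Pairwise (fun a b => b ≤ a) := PySem.List.sorted_pairwise_rev l (fun c => c)
    have hcount1 : s.count '1' = cnt := by
      rw [hperm.count_eq, hl, binChars_count, hc]
      congr 1
      omega
    have hlen : s.length = w := by
      rw [hperm.length_eq, hl, binChars_length num.toNat (by omega), hw]
      congr 1
      omega
    have hcount0 : s.count '0' = w - cnt := by
      have := count01 s hsm
      omega
    rw [desc_binary s hsm hpw, hcount1, hcount0, parseBin2_block]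
    ring
  · rw [if_neg h, if_pos (by omega)]
    simp
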